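-- pv_equiv track=rewrite | github.com/LucasConde22/TPs-TDA | Guías/PD/11.py | operaciones
-- ===== SOURCE A (Python) =====
-- MAS1 = "mas1"
--
-- POR2 = "por2"
--
-- def operaciones(k):
--     matriz = []
--     for i in range(k + 1):
--         matriz.append([0] * (k + 1))
--
--         for j in range(1, k + 1):
--             if matriz[i-1][j] != 0:
--                 matriz[i][j] = matriz[i-1][j]
--             elif j == i + 1:
--                 matriz[i][j] = 1
--             elif j == i * 2:
--                 matriz[i][j] = 2
--
--             if j > i * 2:
--                 break
--
--         if matriz[i][k]:
--             break
--
--     return reconstruir_operaciones(matriz)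
--
-- def reconstruir_operaciones(matriz):
--     fil, col = len(matriz) - 1, len(matriz[0]) - 1
--
--     camino = []
--     while fil >= 0:
--         if fil != 0 and matriz[fil][col] == matriz[fil - 1][col]:
--             fil -= 1
--             continue
--
--         if matriz[fil][col] == 1:
--             camino.append(MAS1)
--         elif matriz[fil][col] == 2:
--             camino.append(POR2)
--         fil, col = fil - 1, fil
--
--     return camino[::-1]
-- ===== SOURCE B (Python) =====
-- MAS1 = "mas1"
--
-- POR2 = "por2"
--
-- def operaciones(k):
--     # backward greedy walk: halve when even (>2), else subtract 1; O(log k)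
--     ops = []
--     cur = k
--     while cur > 0:
--         if cur % 2 == 0 and cur > 2:
--             ops.append(POR2)
--             cur //= 2
--         else:
--             ops.append(MAS1)
--             cur -= 1
--     return ops[::-1]
-- ===== Notes on version B (the rewrite author's own statement) =====
-- stated objective: faster
-- what changed: Replaced the quadratic DP matrix build plus path reconstruction with a direct backward greedy walk (halve an even value above two, otherwise subtract one), collecting the operations and reversing once.
import Mathlib
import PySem

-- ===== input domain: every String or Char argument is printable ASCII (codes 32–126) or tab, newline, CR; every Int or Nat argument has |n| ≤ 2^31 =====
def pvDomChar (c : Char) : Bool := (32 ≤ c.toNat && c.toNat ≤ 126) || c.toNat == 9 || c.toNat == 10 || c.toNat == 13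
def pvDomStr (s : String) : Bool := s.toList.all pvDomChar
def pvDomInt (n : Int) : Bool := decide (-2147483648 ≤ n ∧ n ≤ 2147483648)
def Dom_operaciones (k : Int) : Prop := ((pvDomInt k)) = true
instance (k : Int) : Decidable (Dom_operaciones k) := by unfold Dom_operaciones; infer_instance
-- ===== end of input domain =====

-- B replaces A's O(k^2) DP matrix + reconstruction by a backward greedy walk (O(log k)).

-- ===== PORT A =====
def MAS1 : String := "mas1"
def POR2 : String := "por2"

-- inner loop 'for j in range(1, k + 1)' with its break; mutates row i of matriz
def pvInnerA (i : Nat) : List Nat → List (List Int) → List (List Int)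
  | [], m => m
  | j :: js, m =>
    -- matriz[i-1][j]: i - 1 is -1 for i = 0 (Python wraps to the last row); j is in range, so getD is exact
    let pv : Int := ((PySem.List.pyGet? m ((i : Int) - 1)).getD []).getD j 0
    let m :=
      if pv ≠ 0 then m.modify i (fun r => r.set j pv)
      else if j = i + 1 then m.modify i (fun r => r.set j 1)
      else if j = i * 2 then m.modify i (fun r => r.set j 2)
      else m
    if j > i * 2 then m else pvInnerA i js m

-- outer loop 'for i in range(k + 1)' with its break on matriz[i][k]
def pvOuterA (k : Int) : List Nat → List (List Int) → List (List Int)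
  | [], m => m
  | i :: is, m =>
    let m := m ++ [List.replicate (k + 1).toNat 0]
    let m := pvInnerA i (List.range' 1 k.toNat) m
    if ((m.getD i []).getD k.toNat 0) ≠ 0 then m else pvOuterA k is m

-- the while-loop of reconstruir_operaciones; fil drops by 1 each iteration
def pvReconA (m : List (List Int)) (fil col : Int) (camino : List String) : List String :=
  if _h : 0 ≤ fil then
    -- matriz[fil][col] and matriz[fil-1][col]; on Pre_ all indices are in range (fil-1 = -1 only when fil = 0, where Python short-circuits; the wrapped read below is then unused)
    let v : Int := (PySem.List.pyGet? ((PySem.List.pyGet? m fil).getD []) col).getD 0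
    let pv : Int := (PySem.List.pyGet? ((PySem.List.pyGet? m (fil - 1)).getD []) col).getD 0
    if fil ≠ 0 ∧ v = pv then
      pvReconA m (fil - 1) col camino
    else
      let camino := if v = 1 then camino ++ [MAS1] else if v = 2 then camino ++ [POR2] else camino
      pvReconA m (fil - 1) fil camino
  else camino
termination_by (fil + 1).toNat
decreasing_by all_goals omega

def operaciones (k : Int) : List String :=
  let m := pvOuterA k (List.range (k + 1).toNat) []
  match m with
  | [] => []  -- negative k: matriz is empty and Python raises IndexError in reconstruir_operaciones (excluded by Pre_)
  | r0 :: _ => (pvReconA m ((m.length : Int) - 1) ((r0.length : Int) - 1) []).reverse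

-- ===== PORT B =====
-- the while-loop of Source B: greedy backward walk accumulating ops
def pvBloop (cur : Int) (ops : List String) : List String :=
  if _h : 0 < cur then
    if PySem.Int.mod cur 2 = 0 ∧ 2 < cur then pvBloop (PySem.Int.floordiv cur 2) (ops ++ [POR2])
    else pvBloop (cur - 1) (ops ++ [MAS1])
  else ops
termination_by cur.toNat
decreasing_by
  · have := PySem.Int.floordiv_lt_iff_lt_mul (a := cur) (q := cur) (b := 2) (by omega)
    have h2 := PySem.Int.le_floordiv_iff_mul_le (a := cur) (q := 0) (b := 2) (by omega)
    omega
  · omega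

def operaciones_alt (k : Int) : List String := (pvBloop k []).reverse

-- ===== PRECONDITION & SPEC =====
-- Pre_ admits exactly the inputs where A returns: on negative k the outer loop builds no rows and
-- reconstruir_operaciones raises IndexError on len(matriz[0]); A returns normally on all other k
def Pre_operaciones (k : Int) : Prop := 0 ≤ k
instance (k : Int) : Decidable (Pre_operaciones k) := by unfold Pre_operaciones; infer_instance
def pvWitness_operaciones : Int := (5)

def Spec_operaciones (k : Int) (out : List String) : Prop := out = operaciones_alt k
instance (k : Int) (out : List String) : Decidable (Spec_operaciones k out) := by unfold Spec_operaciones; infer_instance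

-- ===== CLAIM (what is proved, stated in full; the proofs are below) =====
def Claim_equal_operaciones : Prop := ∀ (k : Int), Dom_operaciones k → Pre_operaciones k → Spec_operaciones k (operaciones k)

-- ===== LEMMAS AND PROOFS =====

-- the common predecessor / "first reachable row" function and the stored mark
def pvPred (c : Nat) : Nat := if c % 2 = 0 ∧ 2 < c then c / 2 else c - 1
def pvVal (c : Nat) : Int := if c % 2 = 0 ∧ 2 < c then 2 else 1
-- the op chain from c down to 1, in the order both programs append it
def pvChain : Nat → List String
  | 0 => []
  | c + 1 => (if (c + 1) % 2 = 0 ∧ 2 < c + 1 then POR2 else MAS1) :: pvChain (pvPred (c + 1))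
decreasing_by simp only [pvPred]; split <;> omega

-- row i of A's matrix while the inner loop has processed columns < j, and the completed row i
def pvRowUpto (k i j : Nat) : List Int :=
  (List.range (k + 1)).map (fun t => if t < j ∧ 1 ≤ t ∧ pvPred t ≤ i then pvVal t else 0)
def pvRow (k i : Nat) : List Int :=
  (List.range (k + 1)).map (fun t => if 1 ≤ t ∧ pvPred t ≤ i then pvVal t else 0)

theorem pvChain_pos (c : Nat) (h : 1 ≤ c) :
    pvChain c = (if c % 2 = 0 ∧ 2 < c then POR2 else MAS1) :: pvChain (pvPred c) := by
  match c with
  | n + 1 => rw [pvChain]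

theorem pvBloop_chain (c : Nat) (ops : List String) : pvBloop (c : Int) ops = ops ++ pvChain c := by
  induction c using Nat.strong_induction_on generalizing ops with
  | _ c ih =>
    match c with
    | 0 => rw [pvBloop]; simp [pvChain]
    | n + 1 =>
      rw [pvBloop, dif_pos (by exact_mod_cast Nat.succ_pos n)]
      have hmod : PySem.Int.mod ((n + 1 : Nat) : Int) 2 = ((n + 1) % 2 : Nat) := by
        exact_mod_cast PySem.Int.mod_natCast (n + 1) 2
      have hdiv : PySem.Int.floordiv ((n + 1 : Nat) : Int) 2 = (((n + 1) / 2 : Nat) : Int) := by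
        exact_mod_cast PySem.Int.floordiv_natCast (n + 1) 2
      by_cases hc : (n + 1) % 2 = 0 ∧ 2 < n + 1
      · rw [if_pos (by constructor <;> [skip; exact_mod_cast hc.2] ; rw [hmod, hc.1]; rfl)]
        rw [hdiv, ih ((n + 1) / 2) (by omega)]
        have hp : pvPred (n + 1) = (n + 1) / 2 := by unfold pvPred; rw [if_pos hc]
        rw [pvChain_pos (n + 1) (by omega), if_pos hc, hp]
        simp
      · have hc' : ¬ (PySem.Int.mod ((n + 1 : Nat) : Int) 2 = 0 ∧ 2 < ((n + 1 : Nat) : Int)) := by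
          rw [hmod]; push_cast; omega
        rw [if_neg hc']
        have : ((n + 1 : Nat) : Int) - 1 = ((n : Nat) : Int) := by push_cast; ring
        rw [this, ih n (by omega)]
        have hp : pvPred (n + 1) = n := by unfold pvPred; rw [if_neg hc]; omega
        rw [pvChain_pos (n + 1) (by omega), if_neg hc, hp]
        simp

theorem pvRowUpto_full (k i j : Nat) (h : k + 1 ≤ j) : pvRowUpto k i j = pvRow k i := by
  unfold pvRowUpto pvRow
  refine List.map_congr_left fun t ht => ?_
  rw [List.mem_range] at ht
  by_cases hc : 1 ≤ t ∧ pvPred t ≤ i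
  · rw [if_pos ⟨by omega, hc⟩, if_pos hc]
  · rw [if_neg (by tauto), if_neg hc]

theorem pvRowUpto_one (k i : Nat) : pvRowUpto k i 1 = List.replicate (k + 1) 0 := by
  unfold pvRowUpto
  refine List.ext_getElem (by simp) fun t h1 h2 => ?_
  simp only [List.getElem_map, List.getElem_range, List.getElem_replicate]
  rw [if_neg (by omega)]

theorem pvRowUpto_stall (k i j : Nat) (h : ¬(1 ≤ j ∧ pvPred j ≤ i)) :
    pvRowUpto k i (j + 1) = pvRowUpto k i j := by
  unfold pvRowUpto
  refine List.map_congr_left fun t ht => ?_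
  by_cases hc : t < j ∧ 1 ≤ t ∧ pvPred t ≤ i
  · rw [if_pos ⟨by omega, hc.2⟩, if_pos hc]
  · have : ¬ (t < j + 1 ∧ 1 ≤ t ∧ pvPred t ≤ i) := by
      rintro ⟨h1, h2⟩
      rcases Nat.lt_succ_iff_lt_or_eq.mp h1 with h1 | rfl
      · exact hc ⟨h1, h2⟩
      · exact h h2
    rw [if_neg this, if_neg hc]

theorem pvRowUpto_set (k i j : Nat) (hjk : j ≤ k) (hc : 1 ≤ j ∧ pvPred j ≤ i) :
    (pvRowUpto k i j).set j (pvVal j) = pvRowUpto k i (j + 1) := by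
  have _hjk := hjk
  unfold pvRowUpto
  refine List.ext_getElem (by simp) fun t h1 h2 => ?_
  rw [List.getElem_set]
  simp only [List.getElem_map, List.getElem_range]
  by_cases ht : j = t
  · subst ht; rw [if_pos rfl, if_pos ⟨by omega, hc⟩]
  · rw [if_neg ht]
    by_cases hc' : t < j ∧ 1 ≤ t ∧ pvPred t ≤ i
    · rw [if_pos hc', if_pos ⟨by omega, hc'.2⟩]
    · have : ¬ (t < j + 1 ∧ 1 ≤ t ∧ pvPred t ≤ i) := by
        rintro ⟨a, b⟩
        exact hc' ⟨by omega, b⟩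
      rw [if_neg hc', if_neg this]

theorem pvPred_big (i t : Nat) (h : i * 2 + 1 < t) : ¬ pvPred t ≤ i := by
  unfold pvPred; split <;> omega

theorem pvRowUpto_break (k i j : Nat) (hb : i * 2 < j) : pvRowUpto k i (j + 1) = pvRow k i := by
  unfold pvRowUpto pvRow
  refine List.map_congr_left fun t ht => ?_
  by_cases hc : 1 ≤ t ∧ pvPred t ≤ i
  · have : t ≤ i * 2 + 1 := by by_contra hh; exact pvPred_big i t (by omega) hc.2
    rw [if_pos ⟨by omega, hc⟩, if_pos hc]
  · rw [if_neg (by tauto), if_neg hc]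

theorem pvModifyApp {α : Type} (M : List α) (r : α) (f : α → α) :
    (M ++ [r]).modify M.length f = M ++ [f r] := by
  induction M with
  | nil => rfl
  | cons a M ih => simpa [List.modify] using ih

theorem pvModifyApp' {α : Type} (M : List α) (r : α) (i : Nat) (h : M.length = i) (f : α → α) :
    (M ++ [r]).modify i f = M ++ [f r] := by subst h; exact pvModifyApp M r f

theorem pvVal_ne_zero (c : Nat) : pvVal c ≠ 0 := by unfold pvVal; split <;> omega

theorem pvRow_getD (k i t : Nat) (h : t ≤ k) :
    (pvRow k i).getD t 0 = if 1 ≤ t ∧ pvPred t ≤ i then pvVal t else 0 := by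
  unfold pvRow; rw [PySem.List.getD_map_range _ _ _ _ (by omega)]

theorem pvRowUpto_getD_self (k i j : Nat) (h : j ≤ k) : (pvRowUpto k i j).getD j 0 = 0 := by
  unfold pvRowUpto; rw [PySem.List.getD_map_range _ _ _ _ (by omega)]; rw [if_neg (by omega)]

theorem pvInnerA_spec (k i : Nat) : ∀ (n j : Nat), 1 ≤ j → j + n = k + 1 →
    pvInnerA i (List.range' j n) ((List.range i).map (pvRow k) ++ [pvRowUpto k i j])
      = (List.range i).map (pvRow k) ++ [pvRow k i] := by
  intro n
  induction n with
  | zero =>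
    intro j hj hn
    show ((List.range i).map (pvRow k) ++ [pvRowUpto k i j]) = _
    rw [pvRowUpto_full k i j (by omega)]
  | succ n ih =>
    intro j hj hn
    have hjk : j ≤ k := by omega
    have hMlen : ((List.range i).map (pvRow k)).length = i := by simp
    rw [List.range'_succ]
    simp only [pvInnerA]
    have hpv : ((PySem.List.pyGet? ((List.range i).map (pvRow k) ++ [pvRowUpto k i j]) ((i : Int) - 1)).getD []).getD j 0
        = if 1 ≤ i ∧ pvPred j ≤ i - 1 then pvVal j else 0 := by
      match i with
      | 0 =>
        rw [show ((0 : Nat) : Int) - 1 = -1 by norm_num, PySem.List.pyGet?_neg_one_append_singleton]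
        rw [Option.getD_some, pvRowUpto_getD_self k 0 j hjk, if_neg (by omega)]
      | i + 1 =>
        rw [show ((i + 1 : Nat) : Int) - 1 = ((i : Nat) : Int) by push_cast; ring,
          PySem.List.pyGet?_natCast]
        rw [List.getElem?_append_left (by simp), List.getElem?_map, List.getElem?_range (by omega)]
        simp only [Option.map_some, Option.getD_some]
        rw [pvRow_getD k i j hjk]
        by_cases hc : pvPred j ≤ i
        · rw [if_pos ⟨hj, hc⟩, if_pos ⟨by omega, by omega⟩]
        · rw [if_neg (by omega), if_neg (by omega)]
    rw [hpv]
    have hstep : (if (if 1 ≤ i ∧ pvPred j ≤ i - 1 then pvVal j else 0) ≠ 0 then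
          ((List.range i).map (pvRow k) ++ [pvRowUpto k i j]).modify i
            (fun r => r.set j (if 1 ≤ i ∧ pvPred j ≤ i - 1 then pvVal j else 0))
        else if j = i + 1 then
          ((List.range i).map (pvRow k) ++ [pvRowUpto k i j]).modify i (fun r => r.set j 1)
        else if j = i * 2 then
          ((List.range i).map (pvRow k) ++ [pvRowUpto k i j]).modify i (fun r => r.set j 2)
        else ((List.range i).map (pvRow k) ++ [pvRowUpto k i j]))
        = (List.range i).map (pvRow k) ++ [pvRowUpto k i (j + 1)] := by
      by_cases h1 : 1 ≤ i ∧ pvPred j ≤ i - 1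
      · rw [if_pos (by rw [if_pos h1]; exact pvVal_ne_zero j), if_pos h1]
        rw [pvModifyApp' _ _ i hMlen]
        rw [pvRowUpto_set k i j hjk ⟨hj, by omega⟩]
      · rw [if_neg (by rw [if_neg h1]; omega)]
        by_cases h2 : j = i + 1
        · have hv1 : ¬ (j % 2 = 0 ∧ 2 < j) := by
            rintro ⟨he, hgt⟩
            have hple : ¬ pvPred j ≤ i - 1 := fun hh => h1 ⟨by omega, hh⟩
            unfold pvPred at hple
            rw [if_pos ⟨he, hgt⟩] at hple
            omega
          have hv : pvVal j = 1 := by unfold pvVal; rw [if_neg hv1]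
          have hp : pvPred j ≤ i := by unfold pvPred; rw [if_neg hv1]; omega
          rw [if_pos h2, pvModifyApp' _ _ i hMlen, ← hv,
            pvRowUpto_set k i j hjk ⟨hj, hp⟩]
        · rw [if_neg h2]
          by_cases h3 : j = i * 2
          · have hi2 : 2 ≤ i := by omega
            have hv : pvVal j = 2 := by unfold pvVal; rw [if_pos ⟨by omega, by omega⟩]
            have hp : pvPred j ≤ i := by unfold pvPred; rw [if_pos ⟨by omega, by omega⟩]; omega
            rw [if_pos h3, pvModifyApp' _ _ i hMlen, ← hv,
              pvRowUpto_set k i j hjk ⟨hj, hp⟩]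
          · rw [if_neg h3, pvRowUpto_stall k i j ?_]
            rintro ⟨-, hple⟩
            have : pvPred j = i := by omega
            unfold pvPred at this
            split at this <;> omega
    rw [hstep]
    by_cases hbr : j > i * 2
    · rw [if_pos hbr, pvRowUpto_break k i j (by omega)]
    · rw [if_neg hbr]
      exact ih (j + 1) (by omega) (by omega)

theorem pvPred_lt (c : Nat) (h : 1 ≤ c) : pvPred c < c := by unfold pvPred; split <;> omega

theorem pvOuterA_spec (k : Nat) (hk : 1 ≤ k) : ∀ (n i : Nat), i ≤ pvPred k → i + n = k + 1 →
    pvOuterA (k : Int) (List.range' i n) ((List.range i).map (pvRow k)) =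
      (List.range (pvPred k + 1)).map (pvRow k) := by
  intro n
  induction n with
  | zero =>
    intro i hi hn
    have := pvPred_lt k hk
    omega
  | succ n ih =>
    intro i hi hn
    rw [List.range'_succ]
    simp only [pvOuterA]
    rw [show ((k : Nat) : Int) + 1 = ((k + 1 : Nat) : Int) by push_cast; ring, Int.toNat_natCast,
      Int.toNat_natCast, ← pvRowUpto_one k i]
    rw [pvInnerA_spec k i k 1 (by omega) (by omega)]
    rw [show (List.range i).map (pvRow k) ++ [pvRow k i] = (List.range (i + 1)).map (pvRow k) by
      rw [List.range_succ, List.map_append]; rfl]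
    have hgd : (((List.range (i + 1)).map (pvRow k)).getD i []).getD k 0
        = if 1 ≤ k ∧ pvPred k ≤ i then pvVal k else 0 := by
      rw [PySem.List.getD_map_range _ _ _ _ (by omega), pvRow_getD k i k (by omega)]
    rw [hgd]
    by_cases hstop : pvPred k ≤ i
    · have : i = pvPred k := by omega
      subst this
      rw [if_pos (by rw [if_pos ⟨hk, le_refl _⟩]; exact pvVal_ne_zero k)]
    · rw [if_neg (by rw [if_neg (by tauto)]; omega)]
      exact ih (i + 1) (by omega) (by omega)

theorem pvRecon_read (k F fil col : Nat) (hfil : fil ≤ F) (hcol : col ≤ k) :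
    (PySem.List.pyGet? ((PySem.List.pyGet? ((List.range (F + 1)).map (pvRow k)) (fil : Int)).getD []) (col : Int)).getD 0
      = if 1 ≤ col ∧ pvPred col ≤ fil then pvVal col else 0 := by
  rw [PySem.List.pyGet?_natCast ((List.range (F + 1)).map (pvRow k)) fil,
    List.getElem?_map, List.getElem?_range (by omega)]
  simp only [Option.map_some, Option.getD_some]
  unfold pvRow
  rw [PySem.List.pyGet?_natCast, List.getElem?_map, List.getElem?_range (by omega)]
  simp only [Option.map_some, Option.getD_some]

theorem pvReconA_spec (k F : Nat) (hF : F = pvPred k) :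
    ∀ (fil col : Nat) (acc : List String), 1 ≤ col → col ≤ k → pvPred col ≤ fil → fil ≤ F →
      pvReconA ((List.range (F + 1)).map (pvRow k)) (fil : Int) (col : Int) acc = acc ++ pvChain col := by
  intro fil
  induction fil using Nat.strong_induction_on with
  | _ fil ih =>
    intro col acc hc1 hck hpc hfF
    cases fil with
    | zero =>
      have hcol1 : col = 1 := by
        unfold pvPred at hpc; split at hpc <;> omega
      subst hcol1
      rw [pvReconA.eq_def, dif_pos (by norm_num)]
      simp only
      rw [pvRecon_read k F 0 1 hfF hck]
      rw [(if_pos ⟨hc1, hpc⟩ :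
        (if 1 ≤ 1 ∧ pvPred 1 ≤ 0 then pvVal 1 else 0) = pvVal 1)]
      have hv1 : pvVal 1 = 1 := by unfold pvVal; rw [if_neg (by omega)]
      rw [hv1]
      rw [if_neg (by simp)]
      rw [if_pos rfl]
      rw [pvReconA.eq_def, dif_neg (by simp)]
      rw [pvChain_pos 1 (by omega), if_neg (by omega)]
      have hp0 : pvPred 1 = 0 := by unfold pvPred; rw [if_neg (by omega)]
      rw [hp0, pvChain]
    | succ fil =>
      rw [pvReconA.eq_def, dif_pos (by positivity)]
      simp only
      rw [pvRecon_read k F (fil + 1) col hfF hck]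
      have hcast : ((fil + 1 : Nat) : Int) - 1 = ((fil : Nat) : Int) := by push_cast; ring
      rw [hcast, pvRecon_read k F fil col (by omega) hck]
      rw [(if_pos ⟨hc1, hpc⟩ :
        (if 1 ≤ col ∧ pvPred col ≤ fil + 1 then pvVal col else 0) = pvVal col)]
      by_cases hskip : pvPred col ≤ fil
      · rw [(if_pos ⟨hc1, hskip⟩ :
          (if 1 ≤ col ∧ pvPred col ≤ fil then pvVal col else 0) = pvVal col)]
        rw [if_pos ⟨by exact_mod_cast Nat.succ_ne_zero fil, rfl⟩]
        exact ih fil (by omega) col acc hc1 hck hskip (by omega)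
      · rw [(if_neg (by rintro ⟨-, hh⟩; exact hskip hh) :
          (if 1 ≤ col ∧ pvPred col ≤ fil then pvVal col else 0) = 0)]
        rw [if_neg (by rintro ⟨-, hveq⟩; exact pvVal_ne_zero col hveq)]
        have hpcol : pvPred col = fil + 1 := by omega
        have hop : (if pvVal col = 1 then acc ++ [MAS1] else if pvVal col = 2 then acc ++ [POR2] else acc)
            = acc ++ [if col % 2 = 0 ∧ 2 < col then POR2 else MAS1] := by
          by_cases hcc : col % 2 = 0 ∧ 2 < col
          · rw [show pvVal col = 2 by unfold pvVal; rw [if_pos hcc], if_neg (by omega), if_pos rfl, if_pos hcc]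
          · rw [show pvVal col = 1 by unfold pvVal; rw [if_neg hcc], if_pos rfl, if_neg hcc]
        rw [hop]
        have hrec := ih fil (by omega) (fil + 1) (acc ++ [if col % 2 = 0 ∧ 2 < col then POR2 else MAS1])
          (by omega) (by have := pvPred_lt col (by omega); omega)
          (by have := pvPred_lt (fil + 1) (by omega); omega) (by omega)
        rw [hrec, ← hpcol, pvChain_pos col (by omega)]
        simp

theorem pvChain_zero : pvChain 0 = [] := by rw [pvChain]

theorem operaciones_eq_chain (k : Nat) : operaciones (k : Int) = (pvChain k).reverse := by
  match k with
  | 0 =>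
    have h : operaciones ((0 : Nat) : Int) = (pvReconA [[0]] 0 0 []).reverse := rfl
    rw [h, pvReconA.eq_def, dif_pos le_rfl]
    simp only
    norm_num [PySem.List.pyGet?, PySem.List.pyIdx?]
    rw [pvReconA.eq_def, dif_neg (by norm_num), pvChain_zero]
  | k + 1 =>
    have hk : 1 ≤ k + 1 := by omega
    have houter : pvOuterA ((k + 1 : Nat) : Int) (List.range (k + 1 + 1)) []
        = (List.range (pvPred (k + 1) + 1)).map (pvRow (k + 1)) := by
      have h := pvOuterA_spec (k + 1) hk (k + 1 + 1) 0 (by omega) (by omega)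
      rw [List.range_eq_range']
      simpa using h
    have hcons : (List.range (pvPred (k + 1) + 1)).map (pvRow (k + 1))
        = pvRow (k + 1) 0 :: (List.range' 1 (pvPred (k + 1))).map (pvRow (k + 1)) := by
      rw [List.range_eq_range', List.range'_succ]
      rfl
    show (let m := pvOuterA ((k + 1 : Nat) : Int) (List.range ((((k + 1 : Nat) : Int)) + 1).toNat) []
      match m with
      | [] => []
      | r0 :: _ => (pvReconA m ((m.length : Int) - 1) ((r0.length : Int) - 1) []).reverse) = (pvChain (k + 1)).reverse
    rw [show ((((k + 1 : Nat) : Int)) + 1).toNat = k + 1 + 1 by omega]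
    simp only [houter, hcons]
    have hlen1 : ((pvRow (k + 1) 0 :: (List.range' 1 (pvPred (k + 1))).map (pvRow (k + 1))).length : Int) - 1
        = ((pvPred (k + 1) : Nat) : Int) := by
      simp [List.length_range']
    have hlen2 : (((pvRow (k + 1) 0).length : Int)) - 1 = ((k + 1 : Nat) : Int) := by
      unfold pvRow
      simp
    rw [hlen1, hlen2, ← hcons]
    rw [pvReconA_spec (k + 1) (pvPred (k + 1)) rfl (pvPred (k + 1)) (k + 1) []
      (by omega) (by omega) (le_refl _) (le_refl _)]
    rfl

-- ===== VERDICT (by name: the statement is the Claim_ definition above) =====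
theorem operaciones_spec : Claim_equal_operaciones := by
  intro k _ hp
  unfold Pre_operaciones at hp
  unfold Spec_operaciones operaciones_alt
  rw [show k = (k.toNat : Int) by omega, operaciones_eq_chain, pvBloop_chain]
  simp
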